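-- pv_equiv track=rewrite | github.com/SAKTHI-STARK/Flames_App | flames.py | flames_calculator
-- ===== SOURCE A (Python) =====
-- def flames_calculator(sum):
--     arr=['F','L','A','M','E','S']
--     for i in range(1,6):
--         val=sum
--         if val>len(arr):
--                 while val>len(arr):
--                     val=val-len(arr)
--                 arr.pop(val-1)
--     #loop for rearrrange the list values
--                 for i in range(0,(len(arr)-val)+1):
--                     swap=arr.pop((len(arr)-1))
--                     arr.insert(0,swap)
--         else:
--             arr.pop(val-1)
--     return arr
-- ===== SOURCE B (Python) =====
-- def flames_calculator(sum):
--     arr = ['F', 'L', 'A', 'M', 'E', 'S']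
--     for _ in range(5):
--         n = len(arr)
--         if sum > n:
--             idx = (sum - 1) % n
--             arr = arr[idx + 1:] + arr[:idx]
--         else:
--             del arr[sum - 1]
--     return arr
-- ===== Notes on version B (the rewrite author's own statement) =====
-- stated objective: faster
-- what changed: B replaces A's repeated-subtraction while loop by a single modulo and replaces A's element-by-element pop/insert rotation loop by one slice concatenation that deletes and rotates in one step.
-- outside the precondition, e.g. on flames_calculator(-2): A raises IndexError, B raises IndexError
import Mathlib
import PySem

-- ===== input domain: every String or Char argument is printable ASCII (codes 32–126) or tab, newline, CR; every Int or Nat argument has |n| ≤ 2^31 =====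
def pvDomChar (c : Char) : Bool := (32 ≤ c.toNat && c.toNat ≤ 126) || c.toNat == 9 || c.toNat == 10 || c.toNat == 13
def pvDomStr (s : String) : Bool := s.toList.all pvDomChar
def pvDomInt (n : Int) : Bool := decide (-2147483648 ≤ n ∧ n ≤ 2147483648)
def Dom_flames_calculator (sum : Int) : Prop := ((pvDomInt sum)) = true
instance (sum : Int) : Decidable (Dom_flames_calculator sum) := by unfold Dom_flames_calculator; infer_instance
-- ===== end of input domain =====

-- B computes each elimination index with one modulo and rotates by slicing, instead of A's
-- repeated subtraction and pop/insert rotation loop (objective: faster, O(1) vs O(sum)).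

-- ===== PORT A =====
-- the while loop 'while val>len(arr): val=val-len(arr)'; fuel val.toNat makes it total
-- (in A the loop only runs with len ≥ 2, where the fuel suffices)
def pvReduceGo (len : Int) : Nat → Int → Int
  | 0, v => v
  | n + 1, v => if len < v then pvReduceGo len n (v - len) else v

def pvReduce (len val : Int) : Int := pvReduceGo len val.toNat val

-- one iteration of the rearrange loop: swap=arr.pop(len(arr)-1); arr.insert(0,swap)
-- (the 'none' fallback is unreachable: in A the list is nonempty here, Python would raise)
def pvRotStep (a : List String) : List String :=
  match PySem.List.pop? a ((a.length : Int) - 1) with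
  | some (swap, rest) => PySem.List.insert rest 0 swap
  | none => a

-- one iteration of the outer 'for i in range(1,6)' loop; none = IndexError from arr.pop
def pvRoundA (sum : Int) (arr : List String) : Option (List String) :=
  let val := sum
  if (arr.length : Int) < val then
    let val := pvReduce (arr.length : Int) val
    match PySem.List.pop? arr (val - 1) with
    | none => none
    | some (_, arr1) =>
        some ((PySem.List.pyRange 0 (((arr1.length : Int) - val) + 1) 1).foldl
                (fun a _ => pvRotStep a) arr1)
  else
    match PySem.List.pop? arr (val - 1) with
    | none => none
    | some (_, arr1) => some arr1

def flames_calculator (sum : Int) : List String :=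
  ((PySem.List.pyRange 1 6 1).foldl (fun st _ => st.bind (pvRoundA sum))
      (some ["F", "L", "A", "M", "E", "S"])).getD []

-- ===== PORT B =====
-- one iteration of B's 'for _ in range(5)' loop; none = IndexError from del arr[sum-1]
def pvRoundB (sum : Int) (arr : List String) : Option (List String) :=
  let n := (arr.length : Int)
  if n < sum then
    let idx := PySem.Int.mod (sum - 1) n
    some (PySem.List.slice arr (some (idx + 1)) none ++ PySem.List.slice arr none (some idx))
  else
    match PySem.List.pop? arr (sum - 1) with
    | none => none
    | some (_, arr1) => some arr1

def flames_calculator_alt (sum : Int) : List String :=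
  ((PySem.List.pyRange 0 5 1).foldl (fun st _ => st.bind (pvRoundB sum))
      (some ["F", "L", "A", "M", "E", "S"])).getD []

-- ===== PRECONDITION & SPEC =====
-- Pre_ excludes exactly sum ≤ -2, where A (and B) raise IndexError from a negative pop index
def Pre_flames_calculator (sum : Int) : Prop := -1 ≤ sum
instance (sum : Int) : Decidable (Pre_flames_calculator sum) := by
  unfold Pre_flames_calculator; infer_instance
def pvWitness_flames_calculator : Int := (2)

def Spec_flames_calculator (sum : Int) (out : List String) : Prop := out = flames_calculator_alt sum
instance (sum : Int) (out : List String) : Decidable (Spec_flames_calculator sum out) := by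
  unfold Spec_flames_calculator; infer_instance

-- ===== CLAIM (what is proved, stated in full; the proofs are below) =====
def Claim_equal_flames_calculator : Prop := ∀ (sum : Int), Dom_flames_calculator sum → Pre_flames_calculator sum → Spec_flames_calculator sum (flames_calculator sum)

-- ===== LEMMAS AND PROOFS =====

theorem pvReduceGo_stop (len : Int) (n : Nat) (v : Int) (h : ¬ len < v) :
    pvReduceGo len n v = v := by
  cases n <;> simp [pvReduceGo, h]

theorem pvReduceGo_eq (len : Int) (hl : 0 < len) :
    ∀ (n : Nat) (v : Int), len < v → v ≤ len + n →
      pvReduceGo len n v = (v - 1) % len + 1 := by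
  intro n
  induction n with
  | zero => intro v hv hb; omega
  | succ n ih =>
      intro v hv hb
      rw [pvReduceGo, if_pos hv]
      by_cases h2 : len < v - len
      · rw [ih (v - len) h2 (by omega)]
        rw [show v - len - 1 = v - 1 - len by ring, Int.sub_emod_right]
      · rw [pvReduceGo_stop len n (v - len) h2]
        have h3 : (v - 1) % len = v - 1 - len := by
          rw [← Int.sub_emod_right (v - 1) len]
          exact Int.emod_eq_of_lt (by omega) (by omega)
        omega

theorem pvReduce_eq (len val : Int) (hl : 0 < len) (hv : len < val) :
    pvReduce len val = (val - 1) % len + 1 := by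
  exact pvReduceGo_eq len hl val.toNat val hv (by omega)

theorem pvRotStep_eq (ds : List String) (z : String) :
    pvRotStep (ds ++ [z]) = z :: ds := by
  have hlen : (ds ++ [z]).length = ds.length + 1 := by simp
  have hcast : ((ds ++ [z]).length : Int) - 1 = ((ds.length : Nat) : Int) := by
    simp [hlen]
  rw [pvRotStep, hcast, PySem.List.pop?_natCast (ds ++ [z]) ds.length (by simp)]
  simp [PySem.List.insert_zero, List.eraseIdx_eq_take_drop_succ,
        List.take_append_of_le_length (Nat.le_refl ds.length)]

theorem rot_fold (l : List Int) :
    ∀ (xs : List String), l.length ≤ xs.length →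
      l.foldl (fun a _ => pvRotStep a) xs =
        xs.drop (xs.length - l.length) ++ xs.take (xs.length - l.length) := by
  induction l with
  | nil => intro xs _; simp
  | cons b l ih =>
      intro xs h
      have hne : xs ≠ [] := by
        intro hxs; rw [hxs] at h; simp at h
      obtain ⟨ds, z, hds⟩ : ∃ ds z, xs = ds ++ [z] :=
        ⟨xs.dropLast, xs.getLast hne, (List.dropLast_append_getLast hne).symm⟩
      subst hds
      have hk : l.length ≤ ds.length := by simp at h; omega
      simp only [List.foldl_cons, pvRotStep_eq]
      rw [ih (z :: ds) (le_trans hk (by simp))]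
      -- j = ds.length - l.length
      have h1 : (z :: ds).length - l.length = (ds.length - l.length) + 1 := by
        simp only [List.length_cons]; omega
      have h2 : (ds ++ [z]).length - (b :: l).length = ds.length - l.length := by
        simp only [List.length_append, List.length_cons, List.length_nil]; omega
      rw [h1, h2]
      simp only [List.drop_succ_cons, List.take_succ_cons]
      rw [List.take_append_of_le_length (by omega),
          List.drop_append_of_le_length (by omega)]
      simp

theorem round_big (sum : Int) (arr : List String) (h0 : arr ≠ [])
    (h : (arr.length : Int) < sum) :
    ∃ b, pvRoundA sum arr = some b ∧ pvRoundB sum arr = some b ∧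
      b.length + 1 = arr.length := by
  have hlp : (0 : Int) < (arr.length : Int) := by
    have := List.length_pos_iff.mpr h0; exact_mod_cast this
  set e : Int := (sum - 1) % (arr.length : Int) with he
  have he0 : 0 ≤ e := Int.emod_nonneg _ (by omega)
  have helt : e < (arr.length : Int) := Int.emod_lt_of_pos _ hlp
  set i : Nat := e.toNat with hi
  have hie : (i : Int) = e := by omega
  have hilt : i < arr.length := by omega
  have hval : pvReduce (arr.length : Int) sum = e + 1 := pvReduce_eq _ _ hlp h
  refine ⟨arr.drop (i + 1) ++ arr.take i, ?_, ?_, ?_⟩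
  · -- A side
    rw [pvRoundA]
    simp only [if_pos h, hval]
    have hidx : e + 1 - 1 = ((i : Nat) : Int) := by omega
    rw [hidx, PySem.List.pop?_natCast arr i hilt]
    dsimp only
    have hm : (arr.eraseIdx i).length = arr.length - 1 := by
      simp [List.length_eraseIdx, hilt]
    have hcnt : ((arr.eraseIdx i).length : Int) - (e + 1) + 1 =
        (((arr.eraseIdx i).length - i : Nat) : Int) := by
      rw [hm]; omega
    rw [hcnt, PySem.List.pyRange_zero_natCast]
    rw [rot_fold _ _ (by simp)]
    simp only [List.length_map, List.length_range]
    have hij : (arr.eraseIdx i).length - ((arr.eraseIdx i).length - i) = i := by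
      omega
    rw [hij]
    rw [List.eraseIdx_eq_take_drop_succ]
    have htl : (arr.take i).length = i := by simp; omega
    rw [List.drop_append_of_le_length (by omega),
        List.take_append_of_le_length (by omega)]
    simp [htl]
  · -- B side
    rw [pvRoundB]
    simp only [if_pos h]
    have hmod : PySem.Int.mod (sum - 1) (arr.length : Int) = e :=
      PySem.Int.mod_eq_emod_of_pos hlp
    rw [hmod]
    rw [PySem.List.slice_from _ (by omega), PySem.List.slice_to _ (by omega)]
    have h1 : (e + 1).toNat = i + 1 := by omega
    have h2 : e.toNat = i := rfl
    rw [h1, h2]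
  · simp [List.length_drop, List.length_take]; omega

-- ===== VERDICT (by name: the statement is the Claim_ definition above) =====
theorem flames_calculator_spec : Claim_equal_flames_calculator := by
  intro sum _ hpre
  unfold Spec_flames_calculator
  by_cases hbig : 7 ≤ sum
  · -- every round takes the big branch; chain round_big five times
    have hr1 : PySem.List.pyRange 1 6 1 = [1, 2, 3, 4, 5] := by decide
    have hr2 : PySem.List.pyRange 0 5 1 = [0, 1, 2, 3, 4] := by decide
    rw [flames_calculator, flames_calculator_alt, hr1, hr2]
    simp only [List.foldl_cons, List.foldl_nil, Option.bind_some]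
    obtain ⟨b1, hA1, hB1, hl1⟩ := round_big sum ["F","L","A","M","E","S"]
      (by simp) (by simp; omega)
    simp at hl1
    obtain ⟨b2, hA2, hB2, hl2⟩ := round_big sum b1
      (by intro hb; rw [hb] at hl1; simp at hl1) (by omega)
    obtain ⟨b3, hA3, hB3, hl3⟩ := round_big sum b2
      (by intro hb; rw [hb] at hl2; simp at hl2; omega) (by omega)
    obtain ⟨b4, hA4, hB4, hl4⟩ := round_big sum b3
      (by intro hb; rw [hb] at hl3; simp at hl3; omega) (by omega)
    obtain ⟨b5, hA5, hB5, hl5⟩ := round_big sum b4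
      (by intro hb; rw [hb] at hl4; simp at hl4; omega) (by omega)
    rw [hA1, hB1]
    simp only [Option.bind_some]
    rw [hA2, hB2]
    simp only [Option.bind_some]
    rw [hA3, hB3]
    simp only [Option.bind_some]
    rw [hA4, hB4]
    simp only [Option.bind_some]
    rw [hA5, hB5]
  · -- finitely many small sums
    have hlo : -1 ≤ sum := hpre
    have hhi : sum ≤ 6 := by omega
    interval_cases sum <;> decide
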